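-- pv_equiv track=rewrite | github.com/mrdavidal/py.checkio.org | zigzag_array.py | create_zigzag
-- ===== SOURCE A (Python) =====
-- def create_zigzag(rows: int, cols: int, start: int = 1) -> list[list[int]]:
--     # your code here
--     conter = start
--     list = [[j for j in range(0, cols)] for i in range(0, rows)]
--     for i in range(len(list)):
--         for j in range(len(list[i])):
--             list[i][j] = conter
--             conter += 1
--     for i in range(len(list)):
--         if i > 0 and i % 2 != 0:
--             list[i].reverse()
--     return list
-- ===== SOURCE B (Python) =====
-- def create_zigzag(rows: int, cols: int, start: int = 1) -> list[list[int]]: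
--     result = []
--     for i in range(rows):
--         row = [start + i * cols + j for j in range(cols)]
--         if i % 2:
--             row.reverse()
--         result.append(row)
--     return result
-- ===== Notes on version B (the rewrite author's own statement) =====
-- stated objective: simpler
-- what changed: Each row is built directly from the closed form start + i*cols + j and reversed when i is odd, replacing A's three phases (dummy init matrix, sequential counter fill by in-place index assignment, separate odd-row reversal pass) with a single per-row construction that keeps no running counter.
import Mathlib
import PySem

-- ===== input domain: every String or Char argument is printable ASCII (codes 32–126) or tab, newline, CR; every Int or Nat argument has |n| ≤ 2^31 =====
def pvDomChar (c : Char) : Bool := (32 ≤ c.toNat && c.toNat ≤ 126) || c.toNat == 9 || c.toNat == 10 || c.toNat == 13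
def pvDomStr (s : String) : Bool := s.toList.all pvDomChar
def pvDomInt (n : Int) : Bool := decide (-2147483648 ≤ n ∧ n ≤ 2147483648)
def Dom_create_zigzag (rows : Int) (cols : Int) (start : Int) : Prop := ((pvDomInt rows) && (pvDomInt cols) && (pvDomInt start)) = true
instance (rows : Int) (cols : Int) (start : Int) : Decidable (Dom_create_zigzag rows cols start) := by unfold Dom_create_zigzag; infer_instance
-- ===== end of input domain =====

-- B builds each row from the closed form start + i*cols + j (reversed for odd i), replacing A's counter fill and separate reversal pass; objective: simpler.


-- ===== PORT A =====
def create_zigzag (rows : Int) (cols : Int) (start : Int) : List (List Int) :=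
  -- list = [[j for j in range(0, cols)] for i in range(0, rows)]
  let l0 : List (List Int) :=
    (PySem.List.pyRange 0 rows 1).map (fun _ => PySem.List.pyRange 0 cols 1)
  -- for i in range(len(list)): for j in range(len(list[i])): list[i][j] = conter; conter += 1
  let fill : List (List Int) × Int :=
    (List.range l0.length).foldl
      (fun (s : List (List Int) × Int) i =>
        let row := s.1.getD i []
        let inner : List Int × Int :=
          (List.range row.length).foldl
            (fun (t : List Int × Int) j => (t.1.set j t.2, t.2 + 1))
            (row, s.2)
        (s.1.set i inner.1, inner.2))
      (l0, start)
  -- for i in range(len(list)): if i > 0 and i % 2 != 0: list[i].reverse()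
  (List.range fill.1.length).foldl
    (fun acc i => if i > 0 ∧ i % 2 ≠ 0 then acc.set i (acc.getD i []).reverse else acc)
    fill.1

-- ===== PORT B =====
def create_zigzag_alt (rows : Int) (cols : Int) (start : Int) : List (List Int) :=
  (PySem.List.pyRange 0 rows 1).map (fun i =>
    let row := (PySem.List.pyRange 0 cols 1).map (fun j => start + i * cols + j)
    if PySem.Int.mod i 2 ≠ 0 then row.reverse else row)

-- ===== PRECONDITION & SPEC =====
def Spec_create_zigzag (rows : Int) (cols : Int) (start : Int) (out : List (List Int)) : Prop := out = create_zigzag_alt rows cols start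
instance (rows : Int) (cols : Int) (start : Int) (out : List (List Int)) : Decidable (Spec_create_zigzag rows cols start out) := by unfold Spec_create_zigzag; infer_instance

-- ===== CLAIM (what is proved, stated in full; the proofs are below) =====
def Claim_equal_create_zigzag : Prop := ∀ (rows : Int) (cols : Int) (start : Int), Dom_create_zigzag rows cols start → Spec_create_zigzag rows cols start (create_zigzag rows cols start)

-- ===== LEMMAS AND PROOFS =====

theorem fillRowLemma (l : Nat) : ∀ (row : List Int) (c : Int), l ≤ row.length →
    (List.range l).foldl (fun (t : List Int × Int) j => (t.1.set j t.2, t.2 + 1)) (row, c)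
    = ((List.range l).map (fun j : Nat => c + (j:Int)) ++ row.drop l, c + l) := by
  induction l with
  | zero => intro row c h; simp
  | succ l ih =>
    intro row c h
    rw [List.range_succ, List.foldl_append, ih row c (by omega)]
    simp only [List.foldl_cons, List.foldl_nil, Prod.mk.injEq]
    have hlen : ((List.range l).map (fun j : Nat => c + (j:Int))).length = l := by simp
    refine ⟨?_, by push_cast; ring⟩
    rw [List.set_append_right _ _ (by omega), hlen, Nat.sub_self]
    rw [List.map_append, List.append_assoc]
    congr 1
    rw [List.drop_eq_getElem_cons (show l < row.length by omega), List.set_cons_zero]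
    simp

theorem fillOuterLemma (r0 : List Int) (n : Nat) (start : Int) (k : Nat) (hk : k ≤ n) :
    (List.range k).foldl
      (fun (s : List (List Int) × Int) i =>
        let row := s.1.getD i []
        let inner : List Int × Int :=
          (List.range row.length).foldl
            (fun (t : List Int × Int) j => (t.1.set j t.2, t.2 + 1))
            (row, s.2)
        (s.1.set i inner.1, inner.2))
      (List.replicate n r0, start)
    = ((List.range k).map
         (fun i : Nat => (List.range r0.length).map
            (fun j : Nat => (start + (i:Int) * r0.length) + (j:Int)))
        ++ List.replicate (n - k) r0,
       start + k * r0.length) := by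
  induction k with
  | zero => simp
  | succ k ih =>
    rw [List.range_succ, List.foldl_append, ih (by omega)]
    simp only [List.foldl_cons, List.foldl_nil]
    set pre := (List.range k).map
      (fun i : Nat => (List.range r0.length).map
        (fun j : Nat => (start + (i:Int) * r0.length) + (j:Int))) with hpre
    have hlen : pre.length = k := by simp [hpre]
    have hrep : List.replicate (n - k) r0 = r0 :: List.replicate (n - k - 1) r0 := by
      rw [show n - k = (n - k - 1) + 1 by omega, List.replicate_succ, Nat.add_sub_cancel]
    have hget : (pre ++ List.replicate (n - k) r0).getD k [] = r0 := by
      rw [List.getD_eq_getElem?_getD, List.getElem?_append_right (by omega), hlen,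
          Nat.sub_self, hrep]
      simp
    rw [hget, fillRowLemma r0.length r0 _ (le_refl _)]
    simp only [List.drop_length, List.append_nil, Prod.mk.injEq]
    refine ⟨?_, by push_cast; ring⟩
    rw [List.set_append_right _ _ (by omega), hlen, Nat.sub_self, hrep, List.set_cons_zero,
        List.map_append, List.append_assoc, show n - (k + 1) = n - k - 1 by omega]
    simp [hpre]

theorem revLoopLemma (f : Nat → List Int) (n : Nat) (k : Nat) (hk : k ≤ n) :
    (List.range k).foldl
      (fun acc i => if i > 0 ∧ i % 2 ≠ 0 then acc.set i (acc.getD i []).reverse else acc)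
      ((List.range n).map f)
    = (List.range n).map (fun i => if i < k ∧ i % 2 ≠ 0 then (f i).reverse else f i) := by
  induction k with
  | zero => simp
  | succ k ih =>
    rw [List.range_succ, List.foldl_append, ih (by omega)]
    simp only [List.foldl_cons, List.foldl_nil]
    by_cases hp : k > 0 ∧ k % 2 ≠ 0
    · rw [if_pos hp]
      have hget : (((List.range n).map fun i => if i < k ∧ i % 2 ≠ 0 then (f i).reverse else f i).getD k []) = f k := by
        rw [List.getD_eq_getElem?_getD, List.getElem?_map, List.getElem?_range (by omega)]
        simp
      rw [hget]
      apply List.ext_getElem (by simp)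
      intro i h1 h2
      rw [List.getElem_set]
      have hi : i < n := by simpa using h2
      by_cases hik : k = i
      · subst hik
        simp [show k < k + 1 ∧ k % 2 ≠ 0 by omega]
      · rw [if_neg hik]
        simp only [List.getElem_map, List.getElem_range]
        by_cases h3 : i < k ∧ i % 2 ≠ 0
        · simp [h3, show i < k + 1 ∧ i % 2 ≠ 0 by omega]
        · rw [if_neg h3, if_neg (by omega)]
    · rw [if_neg hp]
      apply List.map_congr_left
      intro i hi
      by_cases h : i % 2 ≠ 0
      · by_cases h2 : i < k
        · simp [h, h2, show i < k + 1 by omega]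
        · have h4 : ¬ (i < k + 1) := by
            intro h5
            exact hp ⟨by omega, by rwa [show k = i by omega]⟩
          simp [h2, h4]
      · simp [h]

theorem czA (rows cols start : Int) :
    create_zigzag rows cols start
    = (List.range rows.toNat).map (fun i : Nat =>
        if i % 2 ≠ 0 then
          ((List.range cols.toNat).map (fun j : Nat => (start + (i:Int) * (cols.toNat:Int)) + (j:Int))).reverse
        else (List.range cols.toNat).map (fun j : Nat => (start + (i:Int) * (cols.toNat:Int)) + (j:Int))) := by
  have hl0 : (PySem.List.pyRange 0 rows 1).map (fun _ => PySem.List.pyRange 0 cols 1)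
      = List.replicate rows.toNat (PySem.List.pyRange 0 cols 1) := by
    simp [PySem.List.pyRange_one, Function.comp_def, List.map_const']
  have hlen : (PySem.List.pyRange 0 cols 1).length = cols.toNat := by simp
  simp only [create_zigzag, hl0, List.length_replicate]
  rw [fillOuterLemma (PySem.List.pyRange 0 cols 1) rows.toNat start rows.toNat le_rfl]
  simp only [Nat.sub_self, List.replicate_zero, List.append_nil, hlen, List.length_map,
    List.length_range]
  rw [revLoopLemma _ rows.toNat rows.toNat le_rfl]
  apply List.map_congr_left
  intro i hi
  have : i < rows.toNat := List.mem_range.mp hi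
  simp [this]

theorem czB (rows cols start : Int) :
    create_zigzag_alt rows cols start
    = (List.range rows.toNat).map (fun i : Nat =>
        if i % 2 ≠ 0 then
          ((List.range cols.toNat).map (fun j : Nat => (start + (i:Int) * (cols.toNat:Int)) + (j:Int))).reverse
        else (List.range cols.toNat).map (fun j : Nat => (start + (i:Int) * (cols.toNat:Int)) + (j:Int))) := by
  simp only [create_zigzag_alt, PySem.List.pyRange_one, List.map_map, Int.sub_zero]
  apply List.map_congr_left
  intro k hk
  simp only [Function.comp_def, zero_add]
  have hmod : (PySem.Int.mod (k:Int) 2 ≠ 0) ↔ (k % 2 ≠ 0) := by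
    rw [PySem.Int.mod_eq_emod_of_pos (by norm_num)]
    omega
  have hrow : (List.range cols.toNat).map (fun j : Nat => start + (k:Int) * cols + (j:Int))
      = (List.range cols.toNat).map (fun j : Nat => (start + (k:Int) * (cols.toNat:Int)) + (j:Int)) := by
    by_cases hc : 0 ≤ cols
    · rw [Int.toNat_of_nonneg hc]
    · rw [Int.toNat_of_nonpos (by omega)]
      simp
  rw [hrow]
  by_cases h : k % 2 ≠ 0
  · rw [if_pos (hmod.mpr h), if_pos h]
  · rw [if_neg (fun hh => h (hmod.mp hh)), if_neg h]

theorem czMain (rows cols start : Int) :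
    create_zigzag rows cols start = create_zigzag_alt rows cols start :=
  (czA rows cols start).trans (czB rows cols start).symm

-- ===== VERDICT (by name: the statement is the Claim_ definition above) =====
theorem create_zigzag_spec : Claim_equal_create_zigzag := by
  intro rows cols start _
  exact czMain rows cols start
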